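-- pv_equiv track=rewrite | github.com/maxmurtazin/Ant-RH | scripts/run_v14_7b_support_calibrated_antipoisson.py | clamp_word_to_dim
-- ===== SOURCE A (Python) =====
-- from typing import Any, DefaultDict, Dict, List, Optional, Sequence, Tuple
--
-- def simplify_word(word: List[Tuple[int, int]], *, max_power: int, max_word_len: int) -> List[Tuple[int, int]]:
--     out: List[Tuple[int, int]] = []
--     for i, p in word:
--         i = int(i)
--         p = int(max(-max_power, min(max_power, int(p))))
--         if p == 0:
--             continue
--         if out and out[-1][0] == i:
--             pp = int(out[-1][1] + p)
--             pp = int(max(-max_power, min(max_power, pp)))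
--             out[-1] = (i, pp)
--             if out[-1][1] == 0:
--                 out.pop()
--             continue
--         out.append((i, p))
--         if len(out) >= int(max_word_len):
--             break
--     return out
--
-- def clamp_word_to_dim(word: List[Tuple[int, int]], dim: int, max_power: int, max_word_len: int) -> List[Tuple[int, int]]:
--     out: List[Tuple[int, int]] = []
--     for i, p in word:
--         ii = int(max(1, min(int(dim) - 1, int(i))))
--         pp = int(max(-max_power, min(max_power, int(p))))
--         if pp == 0:
--             continue
--         out.append((ii, pp))
--     out = simplify_word(out, max_power=max_power, max_word_len=max_word_len)
--     if len(out) < 2 and out: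
--         i0 = out[0][0]
--         i1 = int(max(1, min(dim - 1, i0 + 1)))
--         out.append((i1, out[0][1]))
--     return out
-- ===== SOURCE B (Python) =====
-- def clamp_word_to_dim(word, dim, max_power, max_word_len):
--     # One fused pass: clamp, drop zeros, merge equal-adjacent indices (with
--     # re-clamp and pop-on-zero) and stop at max_word_len -- no intermediate
--     # list, no helper call.
--     out = []
--     for i, p in word:
--         ii = max(1, min(int(dim) - 1, int(i)))
--         pp = max(-max_power, min(max_power, int(p)))
--         if pp == 0:
--             continue
--         if out and out[-1][0] == ii:
--             s = max(-max_power, min(max_power, out[-1][1] + pp))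
--             if s == 0:
--                 out.pop()
--             else:
--                 out[-1] = (ii, s)
--         else:
--             out.append((ii, pp))
--             if len(out) >= int(max_word_len):
--                 break
--     if len(out) < 2 and out:
--         out.append((max(1, min(dim - 1, out[0][0] + 1)), out[0][1]))
--     return out
-- ===== Notes on version B (the rewrite author's own statement) =====
-- stated objective: simpler
-- what changed: B replaces A's two-pass structure (a clamp-and-filter pass building an intermediate list, then a call to simplify_word for the merge/truncate pass) with one fused loop that clamps, drops zeros, merges adjacent equal indices and enforces max_word_len in a single traversal with no intermediate list and no helper function.
import Mathlib
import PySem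

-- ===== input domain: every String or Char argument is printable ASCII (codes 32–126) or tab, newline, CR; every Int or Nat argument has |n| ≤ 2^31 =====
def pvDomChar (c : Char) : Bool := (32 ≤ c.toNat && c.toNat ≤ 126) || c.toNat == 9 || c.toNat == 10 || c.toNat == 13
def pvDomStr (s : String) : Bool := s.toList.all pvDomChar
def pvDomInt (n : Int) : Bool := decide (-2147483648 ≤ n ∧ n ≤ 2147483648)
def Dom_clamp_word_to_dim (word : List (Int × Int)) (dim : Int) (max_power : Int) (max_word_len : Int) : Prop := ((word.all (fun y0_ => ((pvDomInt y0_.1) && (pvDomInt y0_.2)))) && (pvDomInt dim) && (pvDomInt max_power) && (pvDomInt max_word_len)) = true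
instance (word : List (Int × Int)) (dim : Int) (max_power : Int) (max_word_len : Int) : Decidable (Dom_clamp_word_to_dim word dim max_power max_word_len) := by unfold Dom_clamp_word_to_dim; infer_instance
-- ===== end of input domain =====

-- B fuses A's clamp pass and simplify_word's merge pass into one traversal with
-- no intermediate list and no helper call (objective: simpler; same asymptotics).

-- ===== PORT A =====
-- `out` is kept in REVERSED order (head = Python's out[-1]) so that
-- out[-1] mutation / out.pop() are head operations; reversed at the end.
-- simplify_word's loop with its `break`, as structural recursion:
def pvSimpGo (max_power max_word_len : Int) : List (Int × Int) → List (Int × Int) → List (Int × Int)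
  | acc, [] => acc.reverse
  | acc, (i, p) :: rest =>
    let p' := max (-max_power) (min max_power p)
    if p' = 0 then pvSimpGo max_power max_word_len acc rest
    else
      match acc with
      | (j, q) :: acc' =>
        if j = i then
          let pp := max (-max_power) (min max_power (q + p'))
          if pp = 0 then pvSimpGo max_power max_word_len acc' rest
          else pvSimpGo max_power max_word_len ((i, pp) :: acc') rest
        else
          if ((((i, p') :: acc).length : Int) ≥ max_word_len) then ((i, p') :: acc).reverse
          else pvSimpGo max_power max_word_len ((i, p') :: acc) rest
      | [] =>
        if (((1 : Nat) : Int) ≥ max_word_len) then [(i, p')]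
        else pvSimpGo max_power max_word_len [(i, p')] rest

def pvSimplifyWord (word : List (Int × Int)) (max_power max_word_len : Int) : List (Int × Int) :=
  pvSimpGo max_power max_word_len [] word

def clamp_word_to_dim (word : List (Int × Int)) (dim : Int) (max_power : Int) (max_word_len : Int) : List (Int × Int) :=
  -- first pass: clamp index and power, drop zero powers
  let out1 := word.foldl (fun out ip =>
    let ii := max 1 (min (dim - 1) ip.1)
    let pp := max (-max_power) (min max_power ip.2)
    if pp = 0 then out else out ++ [(ii, pp)]) []
  let out := pvSimplifyWord out1 max_power max_word_len
  -- `if len(out) < 2 and out:` i.e. out is a singleton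
  match out with
  | [(i0, p0)] => [(i0, p0), (max 1 (min (dim - 1) (i0 + 1)), p0)]
  | _ => out

-- ===== PORT B =====
-- Source B's single fused loop; the `for … break` is a foldl over (out, done),
-- with out again in reversed order (head = out[-1]).
def pvFusedStep (dim max_power max_word_len : Int) (st : List (Int × Int) × Bool) (ip : Int × Int) : List (Int × Int) × Bool :=
  if st.2 then st
  else
    let ii := max 1 (min (dim - 1) ip.1)
    let pp := max (-max_power) (min max_power ip.2)
    if pp = 0 then st
    else
      match st.1 with
      | (j, q) :: acc' =>
        if j = ii then
          let s := max (-max_power) (min max_power (q + pp))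
          if s = 0 then (acc', false) else ((ii, s) :: acc', false)
        else
          (((ii, pp) :: st.1), decide ((((ii, pp) :: st.1).length : Int) ≥ max_word_len))
      | [] => ([(ii, pp)], decide ((((1 : Nat)) : Int) ≥ max_word_len))

def clamp_word_to_dim_alt (word : List (Int × Int)) (dim : Int) (max_power : Int) (max_word_len : Int) : List (Int × Int) :=
  let out := (word.foldl (pvFusedStep dim max_power max_word_len) ([], false)).1.reverse
  -- `if len(out) < 2 and out:` append the padding pair
  if out.length < 2 && !out.isEmpty then
    out ++ [(max 1 (min (dim - 1) ((out.headD (0, 0)).1 + 1)), (out.headD (0, 0)).2)]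
  else out

-- ===== PRECONDITION & SPEC =====
def Spec_clamp_word_to_dim (word : List (Int × Int)) (dim : Int) (max_power : Int) (max_word_len : Int) (out : List (Int × Int)) : Prop := out = clamp_word_to_dim_alt word dim max_power max_word_len
instance (word : List (Int × Int)) (dim : Int) (max_power : Int) (max_word_len : Int) (out : List (Int × Int)) : Decidable (Spec_clamp_word_to_dim word dim max_power max_word_len out) := by unfold Spec_clamp_word_to_dim; infer_instance

-- ===== CLAIM (what is proved, stated in full; the proofs are below) =====
def Claim_equal_clamp_word_to_dim : Prop := ∀ (word : List (Int × Int)) (dim : Int) (max_power : Int) (max_word_len : Int), Dom_clamp_word_to_dim word dim max_power max_word_len → Spec_clamp_word_to_dim word dim max_power max_word_len (clamp_word_to_dim word dim max_power max_word_len)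

-- ===== LEMMAS AND PROOFS =====

-- the clamp-and-filter first pass of A, as a filterMap
def pvFilt (dim max_power : Int) (word : List (Int × Int)) : List (Int × Int) :=
  word.filterMap (fun ip =>
    let ii := max 1 (min (dim - 1) ip.1)
    let pp := max (-max_power) (min max_power ip.2)
    if pp = 0 then none else some (ii, pp))

theorem pvFoldFilt (dim max_power : Int) (word : List (Int × Int)) (out : List (Int × Int)) :
    word.foldl (fun out ip =>
      let ii := max 1 (min (dim - 1) ip.1)
      let pp := max (-max_power) (min max_power ip.2)
      if pp = 0 then out else out ++ [(ii, pp)]) out = out ++ pvFilt dim max_power word := by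
  induction word generalizing out with
  | nil => simp [pvFilt]
  | cons hd tl ih =>
    simp only [List.foldl, pvFilt, List.filterMap]
    by_cases h : max (-max_power) (min max_power hd.2) = 0 <;>
      simp [h, ih, pvFilt]

theorem pvClampIdem (m x : Int) :
    max (-m) (min m (max (-m) (min m x))) = max (-m) (min m x) := by omega

theorem pvFoldDone (dim max_power max_word_len : Int) (l : List (Int × Int)) (acc : List (Int × Int)) :
    l.foldl (pvFusedStep dim max_power max_word_len) (acc, true) = (acc, true) := by
  induction l with
  | nil => rfl
  | cons hd tl ih => simpa [pvFusedStep] using ih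

theorem pvFusedEqSimp (dim max_power max_word_len : Int) (l : List (Int × Int)) (acc : List (Int × Int)) :
    (l.foldl (pvFusedStep dim max_power max_word_len) (acc, false)).1.reverse
      = pvSimpGo max_power max_word_len acc (pvFilt dim max_power l) := by
  induction l generalizing acc with
  | nil => simp [pvSimpGo, pvFilt]
  | cons hd tl ih =>
    simp only [List.foldl, pvFilt, List.filterMap]
    by_cases hz : max (-max_power) (min max_power hd.2) = 0
    · simpa [pvFusedStep, hz, pvFilt] using ih acc
    · simp only [hz, if_false]
      simp only [pvSimpGo, pvClampIdem, hz]
      match hacc : acc with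
      | [] =>
        by_cases hb : max_word_len ≤ (1 : Int)
        · simp [pvFusedStep, hz, hb, pvFoldDone]
        · simpa [pvFusedStep, hz, hb, pvFilt] using ih [(max 1 (min (dim - 1) hd.1), max (-max_power) (min max_power hd.2))]
      | (j, q) :: acc' =>
        by_cases hj : j = max 1 (min (dim - 1) hd.1)
        · by_cases hs : max (-max_power) (min max_power (q + max (-max_power) (min max_power hd.2))) = 0
          · simpa [pvFusedStep, hz, hj, hs, pvFilt] using ih acc'
          · simpa [pvFusedStep, hz, hj, hs, pvFilt] using
              ih ((max 1 (min (dim - 1) hd.1), max (-max_power) (min max_power (q + max (-max_power) (min max_power hd.2)))) :: acc')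
        · by_cases hb : max_word_len ≤ (acc'.length : Int) + 1 + 1
          · simp [pvFusedStep, hz, hj, hb, pvFoldDone]
          · simpa [pvFusedStep, hz, hj, hb, pvFilt] using
              ih ((max 1 (min (dim - 1) hd.1), max (-max_power) (min max_power hd.2)) :: (j, q) :: acc')

theorem pvPadEq (dim : Int) (out : List (Int × Int)) :
    (match out with
      | [(i0, p0)] => [(i0, p0), (max 1 (min (dim - 1) (i0 + 1)), p0)]
      | _ => out)
    = if out.length < 2 && !out.isEmpty then
        out ++ [(max 1 (min (dim - 1) ((out.headD (0, 0)).1 + 1)), (out.headD (0, 0)).2)]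
      else out := by
  match out with
  | [] => simp
  | [(i0, p0)] => simp
  | x :: y :: t => simp

-- ===== VERDICT (by name: the statement is the Claim_ definition above) =====
theorem clamp_word_to_dim_spec : Claim_equal_clamp_word_to_dim := by
  intro word dim max_power max_word_len _
  unfold Spec_clamp_word_to_dim clamp_word_to_dim clamp_word_to_dim_alt pvSimplifyWord
  rw [pvFoldFilt, pvFusedEqSimp]
  simpa using pvPadEq dim (pvSimpGo max_power max_word_len [] (pvFilt dim max_power word))
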